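-- pv_equiv track=rewrite | github.com/maximeusdin/friday | concordance/test_citation_parsing.py | expand_page_ranges
-- ===== SOURCE A (Python) =====
-- def expand_page_ranges(pages):
--     """Expand page ranges into individual page numbers."""
--     expanded = []
--     for start, end in pages:
--         if end is None:
--             expanded.append(start)
--         else:
--             for page_num in range(start, end + 1):
--                 expanded.append(page_num)
--     return sorted(set(expanded))
-- ===== SOURCE B (Python) =====
-- def expand_page_ranges(pages):
--     """Expand page ranges into individual page numbers."""
--     intervals = []
--     for start, end in pages:
--         hi = start if end is None else end
--         if start <= hi:
--             intervals.append((start, hi))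
--     intervals.sort(key=lambda t: t[0])
--     result = []
--     i, n = 0, len(intervals)
--     while i < n:
--         lo, hi = intervals[i]
--         i += 1
--         while i < n and intervals[i][0] <= hi + 1:
--             if intervals[i][1] > hi:
--                 hi = intervals[i][1]
--             i += 1
--         result.extend(range(lo, hi + 1))
--     return result
-- ===== Notes on version B (the rewrite author's own statement) =====
-- stated objective: alternative
-- what changed: B normalizes each pair to a concrete interval (dropping empty ones), sorts the intervals by start, and sweeps once merging overlapping/adjacent runs, emitting the sorted unique pages directly instead of A's expand-everything-then-sorted(set(...)).
import Mathlib
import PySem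

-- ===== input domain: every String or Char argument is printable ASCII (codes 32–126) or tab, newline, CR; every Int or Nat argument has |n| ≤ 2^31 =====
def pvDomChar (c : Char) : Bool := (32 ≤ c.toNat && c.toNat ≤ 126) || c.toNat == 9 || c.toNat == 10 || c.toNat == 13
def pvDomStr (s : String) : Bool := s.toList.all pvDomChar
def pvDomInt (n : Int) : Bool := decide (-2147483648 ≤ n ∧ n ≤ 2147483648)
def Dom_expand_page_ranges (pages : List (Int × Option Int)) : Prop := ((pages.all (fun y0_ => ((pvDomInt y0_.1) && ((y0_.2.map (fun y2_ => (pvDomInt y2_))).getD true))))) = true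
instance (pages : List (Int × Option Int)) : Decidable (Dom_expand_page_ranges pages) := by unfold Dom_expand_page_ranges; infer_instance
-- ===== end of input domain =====

-- B replaces A's "expand every range into single pages, then sorted(set(...))" by a
-- sort-and-sweep over normalized intervals that emits the sorted unique pages directly (no set, no final sort).

-- ===== PORT A =====
def expand_page_ranges (pages : List (Int × Option Int)) : List Int :=
  let expanded := pages.foldl (fun acc p =>
    acc ++ (match p.2 with
            | none => [p.1]
            | some e => PySem.List.pyRange p.1 (e + 1) 1)) []
  PySem.List.sorted (PySem.Set.ofList expanded) (fun x => x) false

-- ===== PORT B =====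
-- the outer/inner while loops of Source B over the remaining sorted intervals
def pvRun : Int → Int → List (Int × Int) → List Int
  | lo, hi, [] => PySem.List.pyRange lo (hi + 1) 1
  | lo, hi, (s, e) :: rest =>
    if s ≤ hi + 1 then pvRun lo (max hi e) rest
    else PySem.List.pyRange lo (hi + 1) 1 ++ pvRun s e rest

def expand_page_ranges_alt (pages : List (Int × Option Int)) : List Int :=
  let intervals := pages.filterMap (fun p =>
    let hi := p.2.getD p.1
    if p.1 ≤ hi then some (p.1, hi) else none)
  match PySem.List.sorted intervals Prod.fst false with
  | [] => []
  | (lo, hi) :: rest => pvRun lo hi rest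

-- ===== PRECONDITION & SPEC =====
def Spec_expand_page_ranges (pages : List (Int × Option Int)) (out : List Int) : Prop := out = expand_page_ranges_alt pages
instance (pages : List (Int × Option Int)) (out : List Int) : Decidable (Spec_expand_page_ranges pages out) := by unfold Spec_expand_page_ranges; infer_instance

-- ===== CLAIM (what is proved, stated in full; the proofs are below) =====
def Claim_equal_expand_page_ranges : Prop := ∀ (pages : List (Int × Option Int)), Dom_expand_page_ranges pages → Spec_expand_page_ranges pages (expand_page_ranges pages)

-- ===== LEMMAS AND PROOFS =====

-- the one-page / whole-range list a single (start, end) pair contributes in A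
def pvGrow (p : Int × Option Int) : List Int :=
  match p.2 with
  | none => [p.1]
  | some e => PySem.List.pyRange p.1 (e + 1) 1

-- the normalized interval list of B
def pvIntervals (pages : List (Int × Option Int)) : List (Int × Int) :=
  pages.filterMap (fun p =>
    let hi := p.2.getD p.1
    if p.1 ≤ hi then some (p.1, hi) else none)

lemma pvIntervals_cons (p : Int × Option Int) (t : List (Int × Option Int)) :
    pvIntervals (p :: t) = pvIntervals [p] ++ pvIntervals t := by
  simp only [pvIntervals, List.filterMap_cons, List.filterMap_nil]
  split <;> simp

lemma mem_grow_iff (p : Int × Option Int) (x : Int) :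
    x ∈ pvGrow p ↔ ∃ q ∈ pvIntervals [p], q.1 ≤ x ∧ x ≤ q.2 := by
  rcases p with ⟨s, e⟩
  cases e with
  | none =>
    have h1 : pvGrow (s, none) = [s] := rfl
    have h2 : pvIntervals [(s, none)] = [(s, s)] := by simp [pvIntervals]
    rw [h1, h2]
    simp only [List.mem_cons, List.not_mem_nil, or_false]
    constructor
    · rintro rfl; exact ⟨_, rfl, le_refl _, le_refl _⟩
    · rintro ⟨q, rfl, ha, hb⟩; omega
  | some e =>
    simp only [pvGrow, pvIntervals, List.filterMap_cons, List.filterMap_nil, Option.getD_some]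
    by_cases h : s ≤ e
    · rw [if_pos h]
      simp only [PySem.List.mem_pyRange_one, List.mem_singleton]
      constructor
      · rintro ⟨h1, h2⟩; exact ⟨(s, e), rfl, h1, by omega⟩
      · rintro ⟨q, rfl, h1, h2⟩; exact ⟨h1, by omega⟩
    · rw [if_neg h]
      simp only [PySem.List.mem_pyRange_one, List.not_mem_nil]
      constructor
      · rintro ⟨h1, h2⟩; omega
      · rintro ⟨q, hq, _⟩; simp at hq

lemma mem_expanded_iff (pages : List (Int × Option Int)) (x : Int) :
    x ∈ pages.flatMap pvGrow ↔ ∃ q ∈ pvIntervals pages, q.1 ≤ x ∧ x ≤ q.2 := by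
  induction pages with
  | nil => simp [pvIntervals]
  | cons p t ih =>
    rw [List.flatMap_cons, pvIntervals_cons]
    constructor
    · intro hx
      rcases List.mem_append.mp hx with hx | hx
      · rcases (mem_grow_iff p x).mp hx with ⟨q, hq, hc⟩
        exact ⟨q, List.mem_append_left _ hq, hc⟩
      · rcases ih.mp hx with ⟨q, hq, hc⟩
        exact ⟨q, List.mem_append_right _ hq, hc⟩
    · rintro ⟨q, hq, hc⟩
      rcases List.mem_append.mp hq with h | h
      · exact List.mem_append_left _ ((mem_grow_iff p x).mpr ⟨q, h, hc⟩)
      · exact List.mem_append_right _ (ih.mpr ⟨q, h, hc⟩)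

lemma interval_valid (pages : List (Int × Option Int)) (q : Int × Int)
    (hq : q ∈ pvIntervals pages) : q.1 ≤ q.2 := by
  unfold pvIntervals at hq
  rcases List.mem_filterMap.mp hq with ⟨p, _, hp⟩
  dsimp only at hp
  split at hp
  · cases hp; assumption
  · cases hp

lemma pvRun_props (rest : List (Int × Int)) (lo hi : Int)
    (hlh : lo ≤ hi)
    (hsort : rest.Pairwise (fun a b => a.1 ≤ b.1))
    (hge : ∀ q ∈ rest, lo ≤ q.1)
    (hval : ∀ q ∈ rest, q.1 ≤ q.2) :
    (pvRun lo hi rest).Pairwise (· < ·) ∧ (∀ y ∈ pvRun lo hi rest, lo ≤ y) ∧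
    (∀ x, x ∈ pvRun lo hi rest ↔ (lo ≤ x ∧ x ≤ hi) ∨ ∃ q ∈ rest, q.1 ≤ x ∧ x ≤ q.2) := by
  induction rest generalizing lo hi with
  | nil =>
    refine ⟨PySem.List.pairwise_lt_pyRange_one lo (hi + 1), ?_, ?_⟩
    · intro y hy
      exact ((PySem.List.mem_pyRange_one).mp hy).1
    · intro x
      rw [show pvRun lo hi [] = PySem.List.pyRange lo (hi + 1) 1 from rfl,
        PySem.List.mem_pyRange_one]
      simp only [List.not_mem_nil, false_and, exists_false, or_false]
      omega
  | cons q t ih =>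
    rcases q with ⟨s, e⟩
    have hse : s ≤ e := hval (s, e) (List.mem_cons_self ..)
    have hlos : lo ≤ s := hge (s, e) (List.mem_cons_self ..)
    have hsortt : t.Pairwise (fun a b => a.1 ≤ b.1) := hsort.of_cons
    have hsfst : ∀ q' ∈ t, s ≤ q'.1 := by
      intro q' hq'; exact List.rel_of_pairwise_cons hsort hq'
    have hvalt : ∀ q' ∈ t, q'.1 ≤ q'.2 := fun q' hq' => hval q' (List.mem_cons_of_mem _ hq')
    by_cases hmerge : s ≤ hi + 1
    · have hrec := ih lo (max hi e) (le_trans hlh (le_max_left _ _)) hsortt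
        (fun q' hq' => hge q' (List.mem_cons_of_mem _ hq')) hvalt
      have heq : pvRun lo hi ((s, e) :: t) = pvRun lo (max hi e) t := by
        simp [pvRun, hmerge]
      rw [heq]
      refine ⟨hrec.1, hrec.2.1, ?_⟩
      intro x
      rw [hrec.2.2 x]
      constructor
      · rintro (⟨h1, h2⟩ | ⟨q', hq', hc⟩)
        · rcases le_or_gt x hi with h | h
          · exact Or.inl ⟨h1, h⟩
          · refine Or.inr ⟨(s, e), List.mem_cons_self .., ?_, ?_⟩ <;> simp <;> omega
        · exact Or.inr ⟨q', List.mem_cons_of_mem _ hq', hc⟩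
      · rintro (⟨h1, h2⟩ | ⟨q', hq', hc⟩)
        · exact Or.inl ⟨h1, le_trans h2 (le_max_left _ _)⟩
        · rcases List.mem_cons.mp hq' with rfl | hq't
          · exact Or.inl ⟨le_trans hlos hc.1, le_trans hc.2 (le_max_right _ _)⟩
          · exact Or.inr ⟨q', hq't, hc⟩
    · have hrec := ih s e hse hsortt hsfst hvalt
      have heq : pvRun lo hi ((s, e) :: t) =
          PySem.List.pyRange lo (hi + 1) 1 ++ pvRun s e t := by
        simp [pvRun, hmerge]
      rw [heq]
      have hrange_mem : ∀ y ∈ PySem.List.pyRange lo (hi + 1) 1, lo ≤ y ∧ y ≤ hi := by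
        intro y hy
        have := (PySem.List.mem_pyRange_one).mp hy
        omega
      refine ⟨?_, ?_, ?_⟩
      · rw [List.pairwise_append]
        refine ⟨PySem.List.pairwise_lt_pyRange_one lo (hi + 1), hrec.1, ?_⟩
        intro a ha b hb
        have h1 := (hrange_mem a ha).2
        have h2 := hrec.2.1 b hb
        omega
      · intro y hy
        rcases List.mem_append.mp hy with hy | hy
        · exact (hrange_mem y hy).1
        · exact le_trans (le_trans hlos (by omega : s ≤ s)) (hrec.2.1 y hy)
      · intro x
        rw [List.mem_append, hrec.2.2 x, PySem.List.mem_pyRange_one]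
        constructor
        · rintro ((⟨h1, h2⟩) | (⟨h1, h2⟩ | ⟨q', hq', hc⟩))
          · exact Or.inl ⟨h1, by omega⟩
          · exact Or.inr ⟨(s, e), List.mem_cons_self .., h1, h2⟩
          · exact Or.inr ⟨q', List.mem_cons_of_mem _ hq', hc⟩
        · rintro (⟨h1, h2⟩ | ⟨q', hq', hc⟩)
          · exact Or.inl ⟨h1, by omega⟩
          · rcases List.mem_cons.mp hq' with rfl | hq't
            · exact Or.inr (Or.inl hc)
            · exact Or.inr (Or.inr ⟨q', hq't, hc⟩)

lemma alt_props (pages : List (Int × Option Int)) :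
    (expand_page_ranges_alt pages).Pairwise (· < ·) ∧
    (∀ x, x ∈ expand_page_ranges_alt pages ↔ ∃ q ∈ pvIntervals pages, q.1 ≤ x ∧ x ≤ q.2) := by
  have hIdef : expand_page_ranges_alt pages =
      (match PySem.List.sorted (pvIntervals pages) Prod.fst false with
       | [] => []
       | (lo, hi) :: rest => pvRun lo hi rest) := rfl
  have hmemS : ∀ q, q ∈ PySem.List.sorted (pvIntervals pages) Prod.fst false ↔ q ∈ pvIntervals pages := by
    intro q; exact PySem.List.mem_sorted (pvIntervals pages) Prod.fst false q
  have hpw : (PySem.List.sorted (pvIntervals pages) Prod.fst false).Pairwise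
      (fun a b => a.1 ≤ b.1) := PySem.List.sorted_pairwise (pvIntervals pages) Prod.fst
  rw [hIdef]
  cases hS : PySem.List.sorted (pvIntervals pages) Prod.fst false with
  | nil =>
    refine ⟨List.Pairwise.nil, ?_⟩
    intro x
    simp only [List.not_mem_nil, false_iff, not_exists]
    rintro q ⟨hq, _⟩
    have := (hmemS q).mpr hq
    rw [hS] at this
    simp at this
  | cons q rest =>
    rcases q with ⟨lo, hi⟩
    rw [hS] at hpw
    have hrest_mem : ∀ q' ∈ rest, q' ∈ pvIntervals pages := by
      intro q' hq'
      exact (hmemS q').mp (by rw [hS]; exact List.mem_cons_of_mem _ hq')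
    have hhead : (lo, hi) ∈ pvIntervals pages := (hmemS _).mp (by rw [hS]; exact List.mem_cons_self ..)
    have hprops := pvRun_props rest lo hi (interval_valid pages _ hhead)
      hpw.of_cons
      (fun q' hq' => List.rel_of_pairwise_cons hpw hq')
      (fun q' hq' => interval_valid pages q' (hrest_mem q' hq'))
    refine ⟨hprops.1, ?_⟩
    intro x
    rw [hprops.2.2 x]
    constructor
    · rintro (hc | ⟨q', hq', hc⟩)
      · exact ⟨(lo, hi), hhead, hc⟩
      · exact ⟨q', hrest_mem q' hq', hc⟩
    · rintro ⟨q', hq', hc⟩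
      have : q' ∈ (lo, hi) :: rest := by rw [← hS]; exact (hmemS q').mpr hq'
      rcases List.mem_cons.mp this with rfl | hq't
      · exact Or.inl hc
      · exact Or.inr ⟨q', hq't, hc⟩

-- ===== VERDICT (by name: the statement is the Claim_ definition above) =====
theorem expand_page_ranges_spec : Claim_equal_expand_page_ranges := by
  intro pages _
  unfold Spec_expand_page_ranges expand_page_ranges
  have hflat : pages.foldl (fun acc p =>
      acc ++ (match p.2 with
              | none => [p.1]
              | some e => PySem.List.pyRange p.1 (e + 1) 1)) [] = pages.flatMap pvGrow := by
    rw [PySem.List.foldl_append_eq_flatMap]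
    rfl
  rw [hflat]
  obtain ⟨hpw, hmem⟩ := alt_props pages
  apply PySem.List.sorted_eq_of_perm_of_pairwise_lt
  · rw [List.perm_ext_iff_of_nodup (hpw.imp ne_of_lt) (PySem.Set.nodup_ofList _)]
    intro x
    rw [hmem x, PySem.Set.mem_ofList, mem_expanded_iff]
  · exact hpw
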